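-- pv_equiv track=rewrite | github.com/michelleduong03/Practice | CAP1/Cap1.py | consecutive_id
-- ===== SOURCE A (Python) =====
-- def consecutive_id(ids):
--     if not ids:
--         return []
--
--     ids.sort()
--     res = [[ids[0], ids[0]]]
--
--     for num in ids[1:]:
--         if num == res[-1][1] + 1:
--             # extend the current range
--             res[-1][1] = num
--         else:
--             # start new range
--             res.append([num, num])
--
--     return res
-- ===== SOURCE B (Python) =====
-- def consecutive_id(ids):
--     # Divide-and-conquer: ranges of each half, then join at the boundary
--     # iff the right half's first range continues the left half's last range.
--     ids.sort()
--     return _ranges(ids)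
--
-- def _ranges(xs):
--     if not xs:
--         return []
--     if len(xs) == 1:
--         return [[xs[0], xs[0]]]
--     mid = len(xs) // 2
--     return _merge(_ranges(xs[:mid]), _ranges(xs[mid:]))
--
-- def _merge(r1, r2):
--     if r1[-1][1] + 1 == r2[0][0]:
--         return r1[:-1] + [[r1[-1][0], r2[0][1]]] + r2[1:]
--     return r1 + r2
-- ===== Notes on version B (the rewrite author's own statement) =====
-- stated objective: alternative
-- what changed: Replaces A's single linear pass that mutates the last range on an adjacent num==prev+1 test with a divide-and-conquer recursion: ranges of each half are computed independently and merged, joining the boundary ranges iff the right half's first range starts one past the left half's last range.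
import Mathlib
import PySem

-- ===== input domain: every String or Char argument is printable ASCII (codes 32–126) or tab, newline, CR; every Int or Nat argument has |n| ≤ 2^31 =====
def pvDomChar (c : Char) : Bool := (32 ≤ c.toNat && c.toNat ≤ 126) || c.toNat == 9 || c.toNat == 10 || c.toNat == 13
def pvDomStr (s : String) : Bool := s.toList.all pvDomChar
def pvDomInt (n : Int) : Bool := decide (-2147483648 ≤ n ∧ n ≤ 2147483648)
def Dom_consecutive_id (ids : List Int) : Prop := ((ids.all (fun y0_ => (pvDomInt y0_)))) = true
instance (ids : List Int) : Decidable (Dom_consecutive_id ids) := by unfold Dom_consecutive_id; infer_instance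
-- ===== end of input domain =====

-- B computes the ranges by divide-and-conquer (merge the two halves' range lists at the
-- boundary) instead of A's single mutate-the-last-range pass; equivalence is about the
-- RETURN value (both Pythons sort the argument in place).

-- ===== PORT A =====
-- one loop step of A: the body of `for num in ids[1:]` acting on `res`
def stepA (res : List (List Int)) (num : Int) : List (List Int) :=
  match res.getLast? with
  | some [lo, hi] =>
      if num = hi + 1 then res.dropLast ++ [[lo, num]]   -- res[-1][1] = num
      else res ++ [[num, num]]
  | _ => res ++ [[num, num]]   -- unreachable: res[-1] is always a 2-element list

def consecutive_id (ids : List Int) : List (List Int) :=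
  if ids = [] then []
  else
    match PySem.List.sorted ids (fun x => x) false with
    | [] => []   -- unreachable: ids ≠ []
    | x :: rest => rest.foldl stepA [[x, x]]

-- ===== PORT B =====
-- `_merge(r1, r2)`: r1[-1] / r2[0] are always 2-element lists by construction, so the
-- `.getD` indexing and the catch-all branch are unreachable defaults, never Python behaviour.
def mergeRuns (r1 r2 : List (List Int)) : List (List Int) :=
  match r1.getLast?, r2.head? with
  | some a, some b =>
      if a.getD 1 0 + 1 = b.getD 0 0 then
        r1.dropLast ++ [[a.getD 0 0, b.getD 1 0]] ++ r2.tail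
      else r1 ++ r2
  | _, _ => r1 ++ r2

-- `_ranges(xs)`; xs[:mid] / xs[mid:] with 0 ≤ mid ≤ len are List.take / List.drop exactly
def dcRuns : List Int → List (List Int)
  | [] => []
  | [x] => [[x, x]]
  | x :: y :: rest =>
      mergeRuns (dcRuns ((x :: y :: rest).take ((x :: y :: rest).length / 2)))
                (dcRuns ((x :: y :: rest).drop ((x :: y :: rest).length / 2)))
termination_by l => l.length
decreasing_by
  · simp; omega
  · simp; omega

def consecutive_id_alt (ids : List Int) : List (List Int) :=
  dcRuns (PySem.List.sorted ids (fun x => x) false)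

-- ===== PRECONDITION & SPEC =====
def Spec_consecutive_id (ids : List Int) (out : List (List Int)) : Prop := out = consecutive_id_alt ids
instance (ids : List Int) (out : List (List Int)) : Decidable (Spec_consecutive_id ids out) := by unfold Spec_consecutive_id; infer_instance

-- ===== CLAIM (what is proved, stated in full; the proofs are below) =====
def Claim_equal_consecutive_id : Prop := ∀ (ids : List Int), Dom_consecutive_id ids → Spec_consecutive_id ids (consecutive_id ids)

-- ===== LEMMAS AND PROOFS =====

-- reference shape: the ranges of lo..cur followed by the runs of the rest
def runsFrom (lo cur : Int) : List Int → List (List Int)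
  | [] => [[lo, cur]]
  | y :: ys => if y = cur + 1 then runsFrom lo y ys else [lo, cur] :: runsFrom y y ys

def runs : List Int → List (List Int)
  | [] => []
  | x :: xs => runsFrom x x xs

theorem foldA_runs (rest : List Int) :
    ∀ (pre : List (List Int)) (lo cur : Int),
      List.foldl stepA (pre ++ [[lo, cur]]) rest = pre ++ runsFrom lo cur rest := by
  induction rest with
  | nil => intro pre lo cur; simp [runsFrom]
  | cons y ys ih =>
      intro pre lo cur
      by_cases h : y = cur + 1
      · simp only [List.foldl, stepA, List.getLast?_concat, List.dropLast_concat,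
          if_pos h, runsFrom, ih]
      · simp only [List.foldl, stepA, List.getLast?_concat, if_neg h, runsFrom]
        rw [ih (pre ++ [[lo, cur]]) y y]
        simp

-- runsFrom depends on its `lo` argument only through the first emitted range
theorem runsFrom_shape (ys : List Int) :
    ∀ (lo lo' cur : Int), ∃ h t,
      runsFrom lo cur ys = [lo, h] :: t ∧ runsFrom lo' cur ys = [lo', h] :: t := by
  induction ys with
  | nil => intro lo lo' cur; exact ⟨cur, [], rfl, rfl⟩
  | cons y ys ih =>
      intro lo lo' cur
      by_cases h : y = cur + 1
      · obtain ⟨hh, t, h1, h2⟩ := ih lo lo' y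
        subst h
        exact ⟨hh, t, by simp [runsFrom, h1], by simp [runsFrom, h2]⟩
      · exact ⟨cur, runsFrom y y ys, by simp [runsFrom, h], by simp [runsFrom, h]⟩

theorem mergeRuns_cons (a : List Int) (r1 r2 : List (List Int)) (h : r1 ≠ []) :
    mergeRuns (a :: r1) r2 = a :: mergeRuns r1 r2 := by
  obtain ⟨b, t, rfl⟩ := List.exists_cons_of_ne_nil h
  cases r2 with
  | nil => simp [mergeRuns]
  | cons c t2 =>
      rcases hL : (b :: t).getLast? with _ | L
      · simp at hL
      · simp only [mergeRuns, List.getLast?_cons_cons, hL, List.head?_cons,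
          List.dropLast_cons₂]
        split_ifs <;> simp

theorem runsFrom_append (xs : List Int) :
    ∀ (lo cur : Int) (l2 : List Int),
      runsFrom lo cur (xs ++ l2) = mergeRuns (runsFrom lo cur xs) (runs l2) := by
  induction xs with
  | nil =>
      intro lo cur l2
      cases l2 with
      | nil => simp [runsFrom, runs, mergeRuns]
      | cons y ys =>
          obtain ⟨h, t, h1, h2⟩ := runsFrom_shape ys y lo y
          by_cases hy : y = cur + 1
          · subst hy
            simp [runsFrom, runs, mergeRuns, h1, h2]
          · have hy' : ¬ (cur + 1 = y) := by omega
            simp [runsFrom, runs, mergeRuns, hy, hy', h1]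
  | cons x xs ih =>
      intro lo cur l2
      by_cases h : x = cur + 1
      · simp only [List.cons_append, runsFrom, if_pos h]
        exact ih lo x l2
      · simp only [List.cons_append, runsFrom, if_neg h]
        rw [ih x x l2]
        obtain ⟨hh, t, h1, _⟩ := runsFrom_shape xs x x x
        rw [mergeRuns_cons _ _ _ (by simp [h1])]

theorem runs_append (l1 l2 : List Int) (h : l1 ≠ []) :
    runs (l1 ++ l2) = mergeRuns (runs l1) (runs l2) := by
  obtain ⟨x, xs, rfl⟩ := List.exists_cons_of_ne_nil h
  simpa [runs] using runsFrom_append xs x x l2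

theorem dcRuns_eq_runs (l : List Int) : dcRuns l = runs l := by
  induction l using dcRuns.induct with
  | case1 => simp [dcRuns, runs]
  | case2 x => simp [dcRuns, runs, runsFrom]
  | case3 x y rest ih1 ih2 =>
      rw [dcRuns, ih1, ih2, ← runs_append _ _ (by
        intro hc
        have := congrArg List.length hc
        simp at this)]
      rw [List.take_append_drop]

-- ===== VERDICT (by name: the statement is the Claim_ definition above) =====
theorem consecutive_id_spec : Claim_equal_consecutive_id := by
  intro ids _
  unfold Spec_consecutive_id consecutive_id consecutive_id_alt
  rw [dcRuns_eq_runs]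
  by_cases hin : ids = []
  · subst hin; decide
  · rw [if_neg hin]
    cases hs : PySem.List.sorted ids (fun x => x) false with
    | nil => simp [runs]
    | cons x rest =>
        simp only [runs]
        simpa using foldA_runs rest [] x x
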